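-- pv_equiv track=rewrite | github.com/JakeDeFord/AOC-2021 | Day3/part1.py | calc_gamma
-- ===== SOURCE A (Python) =====
-- def calc_gamma(data):
--     gamma = [0]*len(data[0])
--     epsilon = [0]*len(data[0])
--     gamma_list = []
--     for x in range(0, len(data[0])):
--         gamma_list.append([y[x] for y in data])
--         ones_count = gamma_list[x].count('1')
--         zeroes_count = gamma_list[x].count('0')
--         if ones_count > zeroes_count:
--             gamma[x] = '1'
--             epsilon[x] = '0'
--         else:
--             gamma[x] = '0'
--             epsilon[x] = '1'
--     gamma = int(''.join(gamma),2)
--     epsilon = int(''.join(epsilon),2)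
--     return gamma, epsilon
-- ===== SOURCE B (Python) =====
-- def calc_gamma(data):
--     cols = len(data[0])
--     counts = [(0, 0) for _ in range(cols)]
--     for row in data:
--         counts = [(o + (c == '1'), z + (c == '0'))
--                   for (o, z), c in zip(counts, row)]
--     gamma = int(''.join('1' if o > z else '0' for o, z in counts), 2)
--     return gamma, ((1 << cols) - 1) - gamma
-- ===== Notes on version B (the rewrite author's own statement) =====
-- stated objective: alternative
-- what changed: Replaces A's per-column materialization (building each column list and scanning it twice with .count) by a single zip-accumulating pass over the rows that maintains (ones, zeros) counters per column, builds gamma arithmetically without the string/int(...,2) round-trip, and derives epsilon as the arithmetic complement ((1<<cols)-1) - gamma instead of a second parallel bit string.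
import Mathlib
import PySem

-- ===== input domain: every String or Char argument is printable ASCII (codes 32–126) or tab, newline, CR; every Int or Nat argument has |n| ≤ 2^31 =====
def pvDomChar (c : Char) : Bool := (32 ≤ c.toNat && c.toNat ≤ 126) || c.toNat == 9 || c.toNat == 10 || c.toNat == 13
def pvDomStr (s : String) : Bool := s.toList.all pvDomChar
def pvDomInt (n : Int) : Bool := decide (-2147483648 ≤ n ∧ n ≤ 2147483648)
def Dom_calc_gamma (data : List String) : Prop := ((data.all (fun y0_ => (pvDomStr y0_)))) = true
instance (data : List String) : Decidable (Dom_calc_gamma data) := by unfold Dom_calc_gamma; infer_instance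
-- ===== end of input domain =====

-- B replaces A's per-column materialization + count scans by one zip-accumulating pass over the rows,
-- builds gamma arithmetically and derives epsilon as the arithmetic complement (2^cols - 1) - gamma.


-- ===== PORT A =====
-- Hand port of Python's int(''.join(l), 2) for the lists this program joins: exact whenever l is a
-- nonempty list containing only '0' and '1', which A's gamma/epsilon lists always are under Pre_.
def pvBitVal (cs : List Char) : Int :=
  cs.foldl (fun a c => 2 * a + (if c = '1' then 1 else 0)) 0

def calc_gamma (data : List String) : Int × Int :=
  let cols := (data.headD "").toList.length            -- len(data[0]); Pre_ requires data ≠ []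
  let st := (PySem.List.pyRange 0 (cols : Int) 1).foldl
      (fun (st : List (List Char) × List Char × List Char) x =>
        let col := data.map (fun y => (PySem.Str.pyGet? y x).getD ' ')  -- y[x]; in range under Pre_
        let gl := st.1 ++ [col]
        let ones := col.count '1'
        let zeros := col.count '0'
        if ones > zeros then (gl, st.2.1 ++ ['1'], st.2.2 ++ ['0'])
        else (gl, st.2.1 ++ ['0'], st.2.2 ++ ['1']))
      ([], [], [])
  (pvBitVal st.2.1, pvBitVal st.2.2)

-- ===== PORT B =====
def calc_gamma_alt (data : List String) : Int × Int :=
  let cols := (data.headD "").toList.length            -- len(data[0]); Pre_ requires data ≠ []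
  let counts := data.foldl
      (fun counts row => List.zipWith
        (fun (oz : Int × Int) c =>
          (oz.1 + (if c = '1' then 1 else 0), oz.2 + (if c = '0' then 1 else 0)))
        counts row.toList)
      (List.replicate cols ((0 : Int), (0 : Int)))
  let gamma := counts.foldl (fun g oz => g * 2 + (if oz.1 > oz.2 then 1 else 0)) 0
  (gamma, ((1 : Int) <<< cols) - 1 - gamma)

-- ===== PRECONDITION & SPEC =====
-- Pre_ excludes exactly the inputs on which Python A raises: empty data (IndexError on data[0]),
-- an empty first row (int('', 2) raises ValueError), and rows shorter than the first row (IndexError on y[x]).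
def Pre_calc_gamma (data : List String) : Prop :=
  data ≠ [] ∧ 0 < (data.headD "").toList.length ∧
    ∀ s ∈ data, (data.headD "").toList.length ≤ s.toList.length
instance (data : List String) : Decidable (Pre_calc_gamma data) := by
  unfold Pre_calc_gamma; infer_instance
def pvWitness_calc_gamma : List String := (["10", "01", "10"])

def Spec_calc_gamma (data : List String) (out : Int × Int) : Prop := out = calc_gamma_alt data
instance (data : List String) (out : Int × Int) : Decidable (Spec_calc_gamma data out) := by unfold Spec_calc_gamma; infer_instance

-- ===== CLAIM (what is proved, stated in full; the proofs are below) =====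
def Claim_equal_calc_gamma : Prop := ∀ (data : List String), Dom_calc_gamma data → Pre_calc_gamma data → Spec_calc_gamma data (calc_gamma data)

-- ===== LEMMAS AND PROOFS =====

-- the character a row contributes to column x (total form used on both sides under Pre_)
def pvChAt (x : Nat) (r : String) : Char := r.toList.getD x ' '

-- per-column majority condition, as A computes it
def pvCond (data : List String) (x : Nat) : Bool :=
  ((data.map (pvChAt x)).count '1') > ((data.map (pvChAt x)).count '0')

theorem pvBitVal_shift (cs : List Char) (a : Int) :
    cs.foldl (fun a c => 2 * a + (if c = '1' then 1 else 0)) a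
      = a * 2 ^ cs.length + pvBitVal cs := by
  induction cs generalizing a with
  | nil => simp [pvBitVal]
  | cons c cs ih =>
    have h1 : pvBitVal (c :: cs)
        = (2 * 0 + (if c = '1' then 1 else 0)) * 2 ^ cs.length + pvBitVal cs := by
      show (c :: cs).foldl (fun a c => 2 * a + (if c = '1' then 1 else 0)) 0 = _
      rw [List.foldl_cons, ih]
    rw [List.foldl_cons, ih, h1, List.length_cons]
    ring

theorem pvBitVal_cons (c : Char) (cs : List Char) :
    pvBitVal (c :: cs) = (if c = '1' then 1 else 0) * 2 ^ cs.length + pvBitVal cs := by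
  show (c :: cs).foldl (fun a c => 2 * a + (if c = '1' then 1 else 0)) 0 = _
  rw [List.foldl_cons, pvBitVal_shift]
  ring

theorem pvBitVal_compl (bs : List Bool) :
    pvBitVal (bs.map (fun b => if b then '0' else '1'))
      = 2 ^ bs.length - 1 - pvBitVal (bs.map (fun b => if b then '1' else '0')) := by
  induction bs with
  | nil => simp [pvBitVal]
  | cons b bs ih =>
    simp only [List.map_cons, pvBitVal_cons, List.length_map, List.length_cons]
    rw [ih]
    cases b <;> simp <;> ring

-- A's fold appends one column / one gamma char / one epsilon char per index
theorem pvAfold (data : List String) (l : List Int)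
    (st : List (List Char) × List Char × List Char) :
    l.foldl
      (fun (st : List (List Char) × List Char × List Char) x =>
        let col := data.map (fun y => (PySem.Str.pyGet? y x).getD ' ')
        let gl := st.1 ++ [col]
        let ones := col.count '1'
        let zeros := col.count '0'
        if ones > zeros then (gl, st.2.1 ++ ['1'], st.2.2 ++ ['0'])
        else (gl, st.2.1 ++ ['0'], st.2.2 ++ ['1'])) st
    = (st.1 ++ l.map (fun x => data.map (fun y => (PySem.Str.pyGet? y x).getD ' ')),
       st.2.1 ++ l.map (fun x =>
         if (data.map (fun y => (PySem.Str.pyGet? y x).getD ' ')).count '1' >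
            (data.map (fun y => (PySem.Str.pyGet? y x).getD ' ')).count '0' then '1' else '0'),
       st.2.2 ++ l.map (fun x =>
         if (data.map (fun y => (PySem.Str.pyGet? y x).getD ' ')).count '1' >
            (data.map (fun y => (PySem.Str.pyGet? y x).getD ' ')).count '0' then '0' else '1')) := by
  induction l generalizing st with
  | nil => simp
  | cons x l ih =>
    simp only [List.foldl_cons, List.map_cons]
    rw [ih]
    split_ifs <;> simp

-- A's index access y[x] at a Nat index, in the total form pvChAt
theorem pvGet_eq_chAt (y : String) (x : Nat) :
    (PySem.Str.pyGet? y (x : Int)).getD ' ' = pvChAt x y := by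
  simp [PySem.Str.pyGet?, PySem.List.pyGet?_natCast, List.getD, pvChAt]

-- B's accumulation pass, characterized per column
theorem pvBfold (rows : List String) (n : Nat) (g : Nat → Int × Int)
    (h : ∀ r ∈ rows, n ≤ r.toList.length) :
    rows.foldl
      (fun counts row => List.zipWith
        (fun (oz : Int × Int) c =>
          (oz.1 + (if c = '1' then 1 else 0), oz.2 + (if c = '0' then 1 else 0)))
        counts row.toList)
      ((List.range n).map g)
    = (List.range n).map (fun x =>
        ((g x).1 + ((rows.map (pvChAt x)).count '1' : Int),
         (g x).2 + ((rows.map (pvChAt x)).count '0' : Int))) := by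
  induction rows generalizing g with
  | nil => simp
  | cons r rows ih =>
    have hr : n ≤ r.toList.length := h r (by simp)
    have hz : List.zipWith
        (fun (oz : Int × Int) c =>
          (oz.1 + (if c = '1' then 1 else 0), oz.2 + (if c = '0' then 1 else 0)))
        ((List.range n).map g) r.toList
        = (List.range n).map (fun x =>
            ((g x).1 + (if pvChAt x r = '1' then 1 else 0),
             (g x).2 + (if pvChAt x r = '0' then 1 else 0))) := by
      have hr' : n ≤ r.length := by simpa using hr
      apply List.ext_getElem
      · simp [Nat.min_eq_left hr']
      · intro i h1 h2
        have hi : i < n := by simpa using h2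
        have hir : i < r.toList.length := lt_of_lt_of_le hi hr
        simp [List.getElem_zipWith, pvChAt, List.getElem?_eq_getElem hir]
    rw [List.foldl_cons, hz, ih _ (fun s hs => h s (by simp [hs]))]
    apply List.map_congr_left
    intro x hx
    simp only [List.map_cons, List.count_cons, beq_iff_eq]
    refine Prod.ext ?_ ?_ <;> · dsimp only; split_ifs <;> push_cast <;> ring

-- ===== VERDICT (by name: the statement is the Claim_ definition above) =====
theorem calc_gamma_spec : Claim_equal_calc_gamma := by
  intro data _ hpre
  obtain ⟨hne, hpos, hlen⟩ := hpre
  show calc_gamma data = calc_gamma_alt data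
  dsimp only [calc_gamma, calc_gamma_alt]
  set n := (data.headD "").toList.length with hn
  -- A side: characterize the fold over the column indices
  rw [PySem.List.pyRange_zero_nat, pvAfold]
  -- rewrite A's per-column functions through pvChAt / pvCond
  have hcol : ∀ x : Nat,
      data.map (fun y => (PySem.Str.pyGet? y (x : Int)).getD ' ') = data.map (pvChAt x) := by
    intro x
    exact List.map_congr_left (fun y _ => pvGet_eq_chAt y x)
  -- B side: characterize the accumulation pass
  rw [show List.replicate n ((0 : Int), (0 : Int))
        = (List.range n).map (fun _ => ((0 : Int), (0 : Int))) by simp [List.map_const'],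
      pvBfold data n _ hlen]
  simp only [List.nil_append, List.map_map]
  have hA1 : List.map ((fun x : Int =>
        if List.count '1' (List.map (fun y => (PySem.Str.pyGet? y x).getD ' ') data) >
           List.count '0' (List.map (fun y => (PySem.Str.pyGet? y x).getD ' ') data) then '1' else '0')
        ∘ fun k : Nat => (k : Int)) (List.range n)
      = (List.range n).map (fun x => if pvCond data x then '1' else '0') :=
    List.map_congr_left fun x _ => by unfold pvCond pvChAt; simp [PySem.Str.pyGet?, PySem.List.pyGet?_natCast, List.getD]
  have hA0 : List.map ((fun x : Int =>
        if List.count '1' (List.map (fun y => (PySem.Str.pyGet? y x).getD ' ') data) >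
           List.count '0' (List.map (fun y => (PySem.Str.pyGet? y x).getD ' ') data) then '0' else '1')
        ∘ fun k : Nat => (k : Int)) (List.range n)
      = (List.range n).map (fun x => if pvCond data x then '0' else '1') :=
    List.map_congr_left fun x _ => by unfold pvCond pvChAt; simp [PySem.Str.pyGet?, PySem.List.pyGet?_natCast, List.getD]
  have hb1 : (List.range n).map (fun x => if pvCond data x then '1' else '0')
      = ((List.range n).map (fun x => pvCond data x)).map (fun b => if b then '1' else '0') := by
    rw [List.map_map]; rfl
  have hb0 : (List.range n).map (fun x => if pvCond data x then '0' else '1')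
      = ((List.range n).map (fun x => pvCond data x)).map (fun b => if b then '0' else '1') := by
    rw [List.map_map]; rfl
  have hGB : List.foldl (fun g oz => g * 2 + if oz.1 > oz.2 then 1 else 0) 0
        (List.map (fun x => ((0 : Int) + ↑(List.count '1' (List.map (pvChAt x) data)),
                             (0 : Int) + ↑(List.count '0' (List.map (pvChAt x) data)))) (List.range n))
      = pvBitVal ((List.range n).map (fun x => if pvCond data x then '1' else '0')) := by
    show _ = ((List.range n).map _).foldl (fun a c => 2 * a + (if c = '1' then 1 else 0)) 0
    rw [List.foldl_map, List.foldl_map]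
    apply (PySem.List.foldl_congr_mem _ _ _ _ _).symm
    intro acc x _
    by_cases h : pvCond data x = true
    · have h' := h
      simp only [pvCond, gt_iff_lt, decide_eq_true_eq] at h'
      simp [h, h']
      ring
    · have h' := h
      simp only [pvCond, gt_iff_lt, decide_eq_true_eq, not_lt] at h'
      simp [h]
      omega
  rw [hA1, hA0, hGB]
  refine Prod.ext rfl ?_
  dsimp only
  rw [hb0, pvBitVal_compl, ← hb1]
  simp [Int.shiftLeft_eq]
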